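-- pv_equiv track=rewrite | github.com/mrinalinichava/PythonCodeDump | Python/rem0contin1.py | remz
-- ===== SOURCE A (Python) =====
-- def remz(a):
--     n=len(a)
--     maxlen=-1
--     curlen=-1
--     prev=-1
--     req=-1
--     prevprev=-1
--     for i in range(n):
--         if(a[i]==0):
--             if(prevprev!=-1):
--                 curlen=i-prevprev-1
--                 if(curlen>maxlen):
--                     maxlen=curlen
--                     req=prev
--             prevprev=prev
--             prev=i
--     if(maxlen==-1):
--         if(prevprev==-1):
--             if(prev>n-prevprev-1):
--                 req=prevprev
--             else:
--                 req=prev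
--         else:
--             req=prev
--     return req
-- ===== SOURCE B (Python) =====
-- def remz(a):
--     P = [i for i, x in enumerate(a) if x == 0]
--     if len(P) <= 2:
--         return P[-1] if P else -1
--     trips = sorted(zip(P, P[1:], P[2:]), key=lambda t: t[0] - t[2])
--     return trips[0][1]
-- ===== Notes on version B (the rewrite author's own statement) =====
-- stated objective: alternative
-- what changed: Replaces A's one-pass five-variable sliding-window state machine by a declarative pipeline: collect the zero positions, handle the 0/1/2-zero cases explicitly, then stably sort the consecutive-position triples by negated surrounding gap and return the middle of the first (stability reproduces A's first-wins tie-break).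
import Mathlib
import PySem

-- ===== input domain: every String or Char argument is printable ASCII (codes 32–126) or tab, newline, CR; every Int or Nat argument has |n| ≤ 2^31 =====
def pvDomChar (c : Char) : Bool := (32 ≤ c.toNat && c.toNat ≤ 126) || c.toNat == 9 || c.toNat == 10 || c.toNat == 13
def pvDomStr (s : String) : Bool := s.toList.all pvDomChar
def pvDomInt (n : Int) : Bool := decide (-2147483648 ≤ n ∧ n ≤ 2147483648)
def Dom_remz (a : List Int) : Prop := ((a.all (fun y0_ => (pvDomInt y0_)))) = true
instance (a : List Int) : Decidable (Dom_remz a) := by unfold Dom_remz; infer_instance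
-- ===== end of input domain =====

-- B replaces A's one-pass five-variable sliding window by: collect zero positions, handle the
-- 0/1/2-zero cases, stably sort the consecutive triples by negated surrounding gap, take the first.

-- ===== PORT A =====
-- state: (maxlen, prev, req, prevprev); the loop over range(n) reading a[i] is walked
-- structurally with the running index i (exact: i covers 0..n-1 and a[i] is the head).
def remzGo : List Int → Int → (Int × Int × Int × Int) → (Int × Int × Int × Int)
  | [], _, st => st
  | x :: rest, i, (maxlen, prev, req, prevprev) =>
    if x = 0 then
      let st' :=
        if prevprev ≠ -1 then
          let curlen := i - prevprev - 1
          if curlen > maxlen then (curlen, prev) else (maxlen, req)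
        else (maxlen, req)
      remzGo rest (i + 1) (st'.1, i, st'.2, prev)
    else
      remzGo rest (i + 1) (maxlen, prev, req, prevprev)

def remz (a : List Int) : Int :=
  let n : Int := a.length
  let st := remzGo a 0 (-1, -1, -1, -1)
  let maxlen := st.1; let prev := st.2.1; let req := st.2.2.1; let prevprev := st.2.2.2
  if maxlen = -1 then
    if prevprev = -1 then
      if prev > n - prevprev - 1 then prevprev else prev
    else prev
  else req

-- ===== PORT B =====
-- P = [i for i, x in enumerate(a) if x == 0]
def zeroPositions (a : List Int) : List Int :=
  ((PySem.List.enumerate a).filter (fun p => p.2 == 0)).map (fun p => p.1)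

-- trips = sorted(zip(P, P[1:], P[2:]), key=lambda t: t[0] - t[2]); return trips[0][1]
def remz_alt (a : List Int) : Int :=
  let P := zeroPositions a
  if P.length ≤ 2 then
    if P ≠ [] then (PySem.List.pyGet? P (-1)).getD 0 else -1
  else
    let trips := List.zip P (List.zip (PySem.List.slice P (some 1)) (PySem.List.slice P (some 2)))
    ((PySem.List.pyGet? (PySem.List.sorted trips (fun t => t.1 - t.2.2) false) 0).getD (0, 0, 0)).2.1

-- ===== PRECONDITION & SPEC =====
def Spec_remz (a : List Int) (out : Int) : Prop := out = remz_alt a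
instance (a : List Int) (out : Int) : Decidable (Spec_remz a out) := by unfold Spec_remz; infer_instance

-- ===== CLAIM (what is proved, stated in full; the proofs are below) =====
def Claim_equal_remz : Prop := ∀ (a : List Int), Dom_remz a → Spec_remz a (remz a)

-- ===== LEMMAS AND PROOFS =====

-- zero positions of a starting at running index i (proof-side characterisation of both programs)
def zpos : List Int → Int → List Int
  | [], _ => []
  | x :: rest, i => if x = 0 then i :: zpos rest (i + 1) else zpos rest (i + 1)

-- A's loop only changes state at zeros: remzGo equals folding A's zero-step over the zero positions.
def zfold : List Int → (Int × Int × Int × Int) → (Int × Int × Int × Int)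
  | [], st => st
  | i :: rest, (maxlen, prev, req, prevprev) =>
    let st' :=
      if prevprev ≠ -1 then
        let curlen := i - prevprev - 1
        if curlen > maxlen then (curlen, prev) else (maxlen, req)
      else (maxlen, req)
    zfold rest (st'.1, i, st'.2, prev)

-- consecutive triples of a position list (= zip(P, P[1:], P[2:]))
def trps : List Int → List (Int × Int × Int)
  | p :: q :: r :: t => (p, q, r) :: trps (q :: r :: t)
  | _ => []

-- first-minimum scan by the key l - r (what the head of the stable sort computes)
def fmStep (b y : Int × Int × Int) : Int × Int × Int :=
  if y.1 - y.2.2 < b.1 - b.2.2 then y else b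

def fm (l : List (Int × Int × Int)) (b : Int × Int × Int) : Int × Int × Int :=
  l.foldl fmStep b

theorem remzGo_eq_zfold (l : List Int) : ∀ (i : Int) (st : Int × Int × Int × Int),
    remzGo l i st = zfold (zpos l i) st := by
  induction l with
  | nil => intro i st; rfl
  | cons x rest ih =>
    intro i st
    obtain ⟨maxlen, prev, req, prevprev⟩ := st
    by_cases hx : x = 0 <;> simp [remzGo, zpos, zfold, hx, ih]

theorem mem_zpos (l : List Int) : ∀ (i : Int) (x : Int), x ∈ zpos l i → i ≤ x ∧ x < i + l.length := by
  induction l with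
  | nil => intro i x h; simp [zpos] at h
  | cons y rest ih =>
    intro i x h
    simp only [zpos] at h
    split at h
    · rcases List.mem_cons.1 h with h | h
      · subst h; refine ⟨le_refl _, ?_⟩; simp
      · have := ih (i + 1) x h; simp at this ⊢; omega
    · have := ih (i + 1) x h; simp at this ⊢; omega

theorem chain_zpos (l : List Int) : ∀ (i j : Int), j < i → List.IsChain (· < ·) (j :: zpos l i) := by
  induction l with
  | nil => intro i j _; exact List.IsChain.singleton j
  | cons y rest ih =>
    intro i j hj
    simp only [zpos]
    split
    · exact List.IsChain.cons_cons hj (ih (i + 1) i (by omega))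
    · exact ih (i + 1) j (by omega)

-- B's comprehension computes exactly the zero positions.
theorem zeroPositions_aux (l : List Int) : ∀ (i : Int),
    ((PySem.List.enumerate l i).filter (fun p => p.2 == 0)).map (fun p => p.1) = zpos l i := by
  induction l with
  | nil => intro i; rfl
  | cons x rest ih =>
    intro i
    by_cases hx : x = 0 <;> simp [PySem.List.enumerate, zpos, hx, ih]

theorem zeroPositions_eq (a : List Int) : zeroPositions a = zpos a 0 :=
  zeroPositions_aux a 0

-- zip(P, P[1:], P[2:]) is the consecutive-triple list.
theorem trps_eq_zip : (P : List Int) → trps P = List.zip P (List.zip (P.drop 1) (P.drop 2))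
  | [] => rfl
  | [_] => rfl
  | [_, _] => rfl
  | p :: q :: r :: t => by
      have ih := trps_eq_zip (q :: r :: t)
      simp only [trps, List.drop, List.zip] at ih ⊢
      simp [ih]

theorem pyGet?_zero {α : Type} (l : List α) : PySem.List.pyGet? l 0 = l.head? := by
  cases l <;> simp [PySem.List.pyGet?, PySem.List.pyIdx?]

-- head of one stable insertion = the first-minimum step
theorem insertBy_head (x b : Int × Int × Int) (bs : List (Int × Int × Int)) :
    ∃ bs', PySem.List.insertBy (fun a c => decide (a.1 - a.2.2 < c.1 - c.2.2)) x (b :: bs)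
      = fmStep b x :: bs' := by
  by_cases h : x.1 - x.2.2 < b.1 - b.2.2
  · exact ⟨b :: bs, by simp [PySem.List.insertBy, fmStep, h]⟩
  · exact ⟨PySem.List.insertBy (fun a c => decide (a.1 - a.2.2 < c.1 - c.2.2)) x bs,
      by simp [PySem.List.insertBy, fmStep, h]⟩

theorem foldl_insertBy_head (t : List (Int × Int × Int)) :
    ∀ (b : Int × Int × Int) (bs : List (Int × Int × Int)),
    ((t.foldl (fun acc x => PySem.List.insertBy (fun a c => decide (a.1 - a.2.2 < c.1 - c.2.2)) x acc)
      (b :: bs)).head?) = some (fm t b) := by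
  induction t with
  | nil => intro b bs; simp [fm]
  | cons x rest ih =>
    intro b bs
    obtain ⟨bs', he⟩ := insertBy_head x b bs
    simp only [List.foldl_cons, he]
    simpa [fm] using ih (fmStep b x) bs'

-- head of the stable sort = first element with minimal key (A's first-wins tie-break)
theorem sorted_head (x : Int × Int × Int) (t : List (Int × Int × Int)) :
    (PySem.List.sorted (x :: t) (fun t => t.1 - t.2.2) false).head? = some (fm t x) := by
  rw [PySem.List.sorted_eq_foldl_insertBy]
  simp only [List.foldl_cons]
  have h1 : PySem.List.insertBy (fun a c => decide (a.1 - a.2.2 < c.1 - c.2.2)) x [] = [x] := by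
    simp [PySem.List.insertBy]
  rw [h1]
  exact foldl_insertBy_head t x []

-- Core: A's fold over the remaining zeros computes the first-minimum scan over the triples.
theorem zfold_eq_fm (zs : List Int) :
    ∀ (p q maxlen req : Int) (b : Int × Int × Int),
      0 ≤ p → p < q → List.IsChain (· < ·) (q :: zs) →
      maxlen = b.2.2 - b.1 - 1 → req = b.2.1 →
      maxlen ≤ (zfold zs (maxlen, q, req, p)).1 ∧
      (zfold zs (maxlen, q, req, p)).2.2.1 = (fm (trps (p :: q :: zs)) b).2.1 := by
  induction zs with
  | nil =>
    intro p q maxlen req b _ _ _ _ hr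
    exact ⟨le_refl _, by simp [zfold, trps, fm, hr]⟩
  | cons r rest ih =>
    intro p q maxlen req b hp hpq hchain hm hr
    rw [List.isChain_cons_cons] at hchain
    obtain ⟨hqr, hchain2⟩ := hchain
    have hp' : (p ≠ -1) := by omega
    have hfm : fm (trps (p :: q :: r :: rest)) b = fm (trps (q :: r :: rest)) (fmStep b (p, q, r)) := by
      simp [trps, fm]
    by_cases h : r - p - 1 > maxlen
    · have hstep : zfold (r :: rest) (maxlen, q, req, p) = zfold rest (r - p - 1, r, q, q) := by
        simp [zfold, hp', h]
      have hb' : fmStep b (p, q, r) = (p, q, r) := by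
        simp only [fmStep]; rw [if_pos (show p - r < b.1 - b.2.2 by omega)]
      obtain ⟨hle, heq⟩ := ih q r (r - p - 1) q (p, q, r) (by omega) hqr hchain2 (by simp) rfl
      rw [hstep, hfm, hb']
      exact ⟨by omega, heq⟩
    · have hstep : zfold (r :: rest) (maxlen, q, req, p) = zfold rest (maxlen, r, req, q) := by
        simp [zfold, hp', h]
      have hb' : fmStep b (p, q, r) = b := by
        simp only [fmStep]; rw [if_neg (show ¬ (p - r < b.1 - b.2.2) by omega)]
      obtain ⟨hle, heq⟩ := ih q r maxlen req b (by omega) hqr hchain2 hm hr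
      rw [hstep, hfm, hb']
      exact ⟨hle, heq⟩

-- ===== VERDICT (by name: the statement is the Claim_ definition above) =====
theorem remz_spec : Claim_equal_remz := by
  intro a _
  unfold Spec_remz remz remz_alt
  rw [remzGo_eq_zfold, zeroPositions_eq]
  have hbound := mem_zpos a 0
  have hchain := chain_zpos a 0 (-1) (by omega)
  have hn : (0 : Int) ≤ a.length := by positivity
  match hP : zpos a 0 with
  | [] =>
    simp only [zfold]
    split_ifs <;> simp_all
  | [p] =>
    have hpmem := hbound p (by rw [hP]; exact List.mem_singleton.2 rfl)
    simp only [zfold]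
    simp only [reduceIte]
    have hget : (PySem.List.pyGet? [p] (-1)).getD 0 = p := by
      simp [PySem.List.pyGet?, PySem.List.pyIdx?]
    split_ifs <;> simp_all <;> omega
  | [p, q] =>
    have hpmem := hbound p (by rw [hP]; simp)
    simp only [zfold]
    have hp : (p ≠ -1) := by omega
    have hget : (PySem.List.pyGet? [p, q] (-1)).getD 0 = q := by
      simp [PySem.List.pyGet?, PySem.List.pyIdx?]
    split_ifs <;> simp_all
  | p :: q :: r :: rest =>
    rw [hP] at hchain
    have hpmem := hbound p (by rw [hP]; simp)
    obtain ⟨hp, hrest1⟩ := List.isChain_cons_cons.1 hchain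
    obtain ⟨hpq, hrest2⟩ := List.isChain_cons_cons.1 hrest1
    obtain ⟨hqr, hrest3⟩ := List.isChain_cons_cons.1 hrest2
    -- A: the first two zeros only shift the window, the third forms the first triple
    have h2 : zfold (p :: q :: r :: rest) (-1, -1, -1, -1) = zfold rest (r - p - 1, r, q, q) := by
      have hp' : (p ≠ -1) := by omega
      have hgt : r - p - 1 > -1 := by omega
      simp [zfold, hp', hgt]
    rw [h2]
    obtain ⟨hle, heq⟩ := zfold_eq_fm rest q r (r - p - 1) q (p, q, r) (by omega) hqr hrest3
      (by simp) rfl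
    have hne : ¬ ((p :: q :: r :: rest : List Int).length ≤ 2) := by simp
    rw [if_neg hne]
    rw [PySem.List.slice_from _ (by norm_num : (0:Int) ≤ 1),
        PySem.List.slice_from _ (by norm_num : (0:Int) ≤ 2)]
    simp only [show ((1:Int)).toNat = 1 from rfl, show ((2:Int)).toNat = 2 from rfl]
    rw [← trps_eq_zip]
    have htr : trps (p :: q :: r :: rest) = (p, q, r) :: trps (q :: r :: rest) := rfl
    rw [htr, pyGet?_zero, sorted_head]
    have hmax : ¬ ((zfold rest (r - p - 1, r, q, q)).1 = -1) := by omega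
    rw [if_neg hmax]
    simpa using heq
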